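-- pv_equiv track=rewrite | github.com/luohao07/roop_moviepy | src/auto_cut.py | set_false_between
-- ===== SOURCE A (Python) =====
-- def set_false_between(array, min_size):
--     false_indices = [i for i, val in enumerate(array) if val is False]
--
--     for i in range(len(false_indices) - 1):
--         if false_indices[i + 1] - false_indices[i] - 1 <= min_size:
--             start_index = false_indices[i]
--             end_index = false_indices[i + 1]
--             for j in range(start_index + 1, end_index):
--                 array[j] = False
--
--     return array
-- ===== SOURCE B (Python) =====
-- def set_false_between(array, min_size):
--     result = []
--     pending = []
--     seen_false = False
--     for val in array:
--         if val is False: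
--             if seen_false and len(pending) <= min_size:
--                 result.extend([False] * len(pending))
--             else:
--                 result.extend(pending)
--             result.append(False)
--             seen_false = True
--             pending = []
--         else:
--             pending.append(val)
--     result.extend(pending)
--     return result
-- ===== Notes on version B (the rewrite author's own statement) =====
-- stated objective: simpler
-- what changed: Replaced the precomputed false-index list and the pairwise index loop with filled ranges by a single pass that buffers the run of non-False values since the last False and flushes it (filled or not) at each False.
import Mathlib
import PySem

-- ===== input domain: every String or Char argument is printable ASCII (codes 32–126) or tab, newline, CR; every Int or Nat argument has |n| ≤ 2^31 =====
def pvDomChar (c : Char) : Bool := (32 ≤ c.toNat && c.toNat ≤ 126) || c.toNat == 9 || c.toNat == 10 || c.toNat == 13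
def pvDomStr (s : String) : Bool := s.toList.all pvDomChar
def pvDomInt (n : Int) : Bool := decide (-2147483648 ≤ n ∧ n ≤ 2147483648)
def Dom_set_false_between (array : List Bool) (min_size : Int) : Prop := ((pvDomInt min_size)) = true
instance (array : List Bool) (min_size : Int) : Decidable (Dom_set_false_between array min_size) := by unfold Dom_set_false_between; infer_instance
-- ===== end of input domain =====

-- B replaces A's precomputed false-index list + pairwise fill loops by a single pass buffering
-- the run since the last False (objective: simpler). Python A mutates its argument in place and
-- returns it; B builds a fresh list — the equivalence proved here is about the RETURN value.

-- ===== PORT A =====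
def set_false_between (array : List Bool) (min_size : Int) : List Bool :=
  let false_indices : List Int :=
    (PySem.List.enumerate array 0).filterMap (fun p => if p.2 = false then some p.1 else none)
  (PySem.List.pyRange 0 ((false_indices.length : Int) - 1) 1).foldl
    (fun arr i =>
      if PySem.List.pyGetD false_indices (i + 1) 0 - PySem.List.pyGetD false_indices i 0 - 1 ≤ min_size then
        let start_index := PySem.List.pyGetD false_indices i 0
        let end_index := PySem.List.pyGetD false_indices (i + 1) 0
        (PySem.List.pyRange (start_index + 1) end_index 1).foldl
          (fun a j => PySem.List.pySetD a j false) arr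
      else arr) array

-- ===== PORT B =====
def set_false_between_alt (array : List Bool) (min_size : Int) : List Bool :=
  let s := array.foldl
    (fun (st : List Bool × Bool × List Bool) val =>
      if val = false then
        (st.1 ++ (if st.2.1 && decide ((st.2.2.length : Int) ≤ min_size)
                  then List.replicate st.2.2.length false else st.2.2) ++ [false],
         true, ([] : List Bool))
      else
        (st.1, st.2.1, st.2.2 ++ [val]))
    (([] : List Bool), false, ([] : List Bool))
  s.1 ++ s.2.2

-- ===== PRECONDITION & SPEC =====
def Spec_set_false_between (array : List Bool) (min_size : Int) (out : List Bool) : Prop := out = set_false_between_alt array min_size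
instance (array : List Bool) (min_size : Int) (out : List Bool) : Decidable (Spec_set_false_between array min_size out) := by unfold Spec_set_false_between; infer_instance

-- ===== CLAIM (what is proved, stated in full; the proofs are below) =====
def Claim_equal_set_false_between : Prop := ∀ (array : List Bool) (min_size : Int), Dom_set_false_between array min_size → Spec_set_false_between array min_size (set_false_between array min_size)

-- ===== LEMMAS AND PROOFS =====

-- proof-side characterization of A's false-index list
def fIdx : List Bool → List Int
  | [] => []
  | b :: l => if b = false then 0 :: (fIdx l).map (· + 1) else (fIdx l).map (· + 1)

-- one fill step of A, for a pair of consecutive false indices (a, b)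
def fill (ms : Int) (arr : List Bool) (a b : Int) : List Bool :=
  if b - a - 1 ≤ ms then
    (PySem.List.pyRange (a + 1) b 1).foldl (fun x j => PySem.List.pySetD x j false) arr
  else arr

def pairsFold (ms : Int) (ps : List (Int × Int)) (arr : List Bool) : List Bool :=
  ps.foldl (fun ar p => fill ms ar p.1 p.2) arr

def fillRun (ms : Int) (t : List Bool) : List Bool :=
  if (t.length : Int) ≤ ms then List.replicate t.length false else t

-- proof-side characterization of B: seen = "a False was already emitted", pend = buffered run
def hAux (ms : Int) : Bool → List Bool → List Bool → List Bool
  | _, pend, [] => pend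
  | seen, pend, false :: rest => (if seen then fillRun ms pend else pend) ++ false :: hAux ms true [] rest
  | seen, pend, true :: rest => hAux ms seen (pend ++ [true]) rest

theorem pyGetD_cons_succ {α : Type} (x : α) (l : List α) (i : Int) (d : α) (h : 0 ≤ i) :
    PySem.List.pyGetD (x :: l) (i + 1) d = PySem.List.pyGetD l i d := by
  rw [PySem.List.pyGetD_of_nonneg _ _ (by omega), PySem.List.pyGetD_of_nonneg _ _ h,
    show (i + 1).toNat = i.toNat + 1 by omega, List.getD_cons_succ]

theorem pyRange_shift (a b k : Int) :
    PySem.List.pyRange (a + k) (b + k) 1 = (PySem.List.pyRange a b 1).map (· + k) := by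
  rw [PySem.List.pyRange_one, PySem.List.pyRange_one, List.map_map,
    show b + k - (a + k) = b - a by ring]
  apply List.map_congr_left; intro n _; simp [Function.comp]; ring

theorem fIdx_filterMap (l : List Bool) (s : Int) :
    (PySem.List.enumerate l s).filterMap (fun p => if p.2 = false then some p.1 else none)
      = (fIdx l).map (· + s) := by
  induction l generalizing s with
  | nil => simp [PySem.List.enumerate_nil, fIdx]
  | cons b l ih =>
    rw [PySem.List.enumerate_cons]
    cases b with
    | false =>
      simp [fIdx, ih (s + 1), List.map_map, Function.comp_def]
      intro a _; omega
    | true =>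
      simp [fIdx, ih (s + 1), List.map_map, Function.comp_def]
      intro a _; omega

theorem pairs_fold_eq (g : List Bool → Int → Int → List Bool) (xs : List Int) (init : List Bool) :
    (PySem.List.pyRange 0 ((xs.length : Int) - 1) 1).foldl
        (fun arr i => g arr (PySem.List.pyGetD xs i 0) (PySem.List.pyGetD xs (i + 1) 0)) init
      = (xs.zip xs.tail).foldl (fun arr p => g arr p.1 p.2) init := by
  induction xs generalizing init with
  | nil => simp [PySem.List.pyRange_one_eq_nil (by norm_num : (0:Int) - 1 ≤ 0)]
  | cons a xs ih =>
    cases xs with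
    | nil => simp [PySem.List.pyRange_one_eq_nil (by norm_num : ((1:Int)) - 1 ≤ 0)]
    | cons b rest =>
      have hlen : (((a :: b :: rest).length : Int)) - 1 = ((b :: rest).length : Int) := by
        simp
      rw [hlen, PySem.List.pyRange_one_cons (by push_cast [List.length_cons]; omega)]
      simp only [List.foldl_cons, PySem.List.pyGetD_zero_cons, zero_add]
      have h1 : PySem.List.pyGetD (a :: b :: rest) 1 0 = b := by
        rw [show (1 : Int) = 0 + 1 by ring, pyGetD_cons_succ _ _ _ _ le_rfl,
          PySem.List.pyGetD_zero_cons]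
      rw [h1]
      have h2 : PySem.List.pyRange 1 ((b :: rest).length : Int) 1
          = (PySem.List.pyRange 0 (((b :: rest).length : Int) - 1) 1).map (· + 1) := by
        have := pyRange_shift 0 (((b :: rest).length : Int) - 1) 1
        simpa using this
      rw [h2, List.foldl_map,
        PySem.List.foldl_congr_mem _ _
          (fun arr i => g arr (PySem.List.pyGetD (b :: rest) i 0)
            (PySem.List.pyGetD (b :: rest) (i + 1) 0)) _ ?_]
      · exact ih (g init a b)
      · intro acc x hx
        have hx0 : 0 ≤ x := (PySem.List.mem_pyRange_one.1 hx).1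
        rw [pyGetD_cons_succ _ _ _ _ hx0, show x + 1 + 1 = (x + 1) + 1 by ring,
          pyGetD_cons_succ _ _ _ _ (by omega)]

theorem A_eq_pairsFold (l : List Bool) (ms : Int) :
    set_false_between l ms = pairsFold ms ((fIdx l).zip (fIdx l).tail) l := by
  have hfi : (PySem.List.enumerate l 0).filterMap
      (fun p => if p.2 = false then some p.1 else none) = fIdx l := by
    rw [fIdx_filterMap]; simp
  simp only [set_false_between, hfi, pairsFold, fill]
  exact pairs_fold_eq
    (fun arr a b => if b - a - 1 ≤ ms then
      (PySem.List.pyRange (a + 1) b 1).foldl (fun x j => PySem.List.pySetD x j false) arr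
    else arr) (fIdx l) l

theorem fIdx_nonneg (l : List Bool) : ∀ x ∈ fIdx l, 0 ≤ x := by
  induction l with
  | nil => simp [fIdx]
  | cons b l ih =>
    cases b <;> simp [fIdx] <;> intro x hx <;> exact le_trans (ih x hx) (by omega)

theorem fIdx_allTrue (l : List Bool) (h : ∀ x ∈ l, x = true) : fIdx l = [] := by
  induction l with
  | nil => rfl
  | cons b l ih =>
    have hb := h b (by simp)
    subst hb
    simp [fIdx, ih (fun x hx => h x (by simp [hx]))]

theorem map_add_add (xs : List Int) (u v : Int) :
    (xs.map (· + u)).map (· + v) = xs.map (· + (u + v)) := by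
  rw [List.map_map]
  apply List.map_congr_left; intro x _; simp [Function.comp]; ring

theorem fIdx_replicate_true_append (n : Nat) (l : List Bool) :
    fIdx (List.replicate n true ++ l) = (fIdx l).map (· + (n : Int)) := by
  induction n with
  | zero => simp
  | succ n ih =>
    rw [List.replicate_succ, List.cons_append]
    simp only [fIdx, reduceCtorEq, Bool.true_eq_false, ite_false, ih, map_add_add]
    push_cast
    exact List.map_congr_left (fun x _ => by ring)

theorem setFold_shiftK (pre arr : List Bool) :
    ∀ (js : List Int), (∀ j ∈ js, 0 ≤ j) →
      js.foldl (fun x j => PySem.List.pySetD x (j + (pre.length : Int)) false) (pre ++ arr)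
        = pre ++ js.foldl (fun x j => PySem.List.pySetD x j false) arr := by
  intro js
  induction js generalizing arr with
  | nil => intro _; rfl
  | cons j js ih =>
    intro h
    have hj : 0 ≤ j := h j (by simp)
    simp only [List.foldl_cons]
    have hstep : PySem.List.pySetD (pre ++ arr) (j + (pre.length : Int)) false
        = pre ++ PySem.List.pySetD arr j false := by
      rw [PySem.List.pySetD_of_nonneg _ _ (by omega), PySem.List.pySetD_of_nonneg _ _ hj,
        show (j + (pre.length : Int)).toNat = pre.length + j.toNat by omega,
        List.set_append_right _ _ (by omega),
        show pre.length + j.toNat - pre.length = j.toNat by omega]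
    rw [hstep, ih _ (fun x hx => h x (by simp [hx]))]

theorem fillShiftK (ms : Int) (pre arr : List Bool) (a b : Int) (ha : 0 ≤ a) :
    fill ms (pre ++ arr) (a + (pre.length : Int)) (b + (pre.length : Int)) = pre ++ fill ms arr a b := by
  unfold fill
  rw [show b + (pre.length : Int) - (a + (pre.length : Int)) - 1 = b - a - 1 by ring]
  split_ifs with hc
  · rw [show a + (pre.length : Int) + 1 = (a + 1) + (pre.length : Int) by ring,
      pyRange_shift, List.foldl_map]
    exact setFold_shiftK pre arr _ (fun j hj => by
      have := (PySem.List.mem_pyRange_one.1 hj).1; omega)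
  · rfl

theorem pairsShiftK (ms : Int) (ps : List (Int × Int)) (pre arr : List Bool)
    (h : ∀ p ∈ ps, 0 ≤ p.1) :
    pairsFold ms (ps.map (fun p => (p.1 + (pre.length : Int), p.2 + (pre.length : Int)))) (pre ++ arr)
      = pre ++ pairsFold ms ps arr := by
  induction ps generalizing arr with
  | nil => rfl
  | cons p ps ih =>
    simp only [List.map_cons, pairsFold, List.foldl_cons]
    rw [fillShiftK ms pre arr p.1 p.2 (h p (by simp))]
    exact ih (fill ms arr p.1 p.2) (fun q hq => h q (by simp [hq]))

theorem fillSegment (pre mid post : List Bool) :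
    (PySem.List.pyRange (pre.length : Int) ((pre.length : Int) + (mid.length : Int)) 1).foldl
        (fun x j => PySem.List.pySetD x j false) (pre ++ mid ++ post)
      = pre ++ List.replicate mid.length false ++ post := by
  induction mid generalizing pre with
  | nil =>
    rw [show ((List.nil (α := Bool)).length : Int) = 0 by simp, add_zero,
      PySem.List.pyRange_one_eq_nil le_rfl]
    simp
  | cons m mid ih =>
    rw [PySem.List.pyRange_one_cons (by push_cast [List.length_cons]; omega)]
    simp only [List.foldl_cons]
    have hstep : PySem.List.pySetD (pre ++ (m :: mid) ++ post) (pre.length : Int) false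
        = (pre ++ [false]) ++ mid ++ post := by
      rw [PySem.List.pySetD_of_nonneg _ _ (by omega), Int.toNat_natCast,
        List.append_assoc, List.set_append_right _ _ le_rfl]
      simp
    rw [hstep]
    have harr : ((pre.length : Int) + ((m :: mid).length : Int)) =
        (((pre ++ [false]).length : Int) + (mid.length : Int)) := by simp; push_cast; ring
    have hlo : (pre.length : Int) + 1 = ((pre ++ [false]).length : Int) := by simp
    rw [harr, hlo, ih (pre ++ [false])]
    simp [List.replicate_succ]

theorem length_fillRun (ms : Int) (t : List Bool) : (fillRun ms t).length = t.length := by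
  unfold fillRun; split_ifs <;> simp

theorem fillFirst (ms : Int) (t rest : List Bool) :
    fill ms (false :: (t ++ false :: rest)) 0 ((t.length : Int) + 1)
      = false :: (fillRun ms t ++ false :: rest) := by
  unfold fill fillRun
  rw [show (t.length : Int) + 1 - 0 - 1 = (t.length : Int) by ring]
  split_ifs with hc
  · have := fillSegment [false] t (false :: rest)
    simp only [List.length_cons, List.length_nil, Nat.cast_one, List.singleton_append,
      List.cons_append] at this ⊢
    rw [show (0 : Int) + 1 = 1 by ring, show (t.length : Int) + 1 = 1 + (t.length : Int) by ring]
    simpa using this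
  · rfl

theorem zip_tail_map (f : Int → Int) (xs : List Int) :
    ((xs.map f).zip (xs.map f).tail) = (xs.zip xs.tail).map (fun p => (f p.1, f p.2)) := by
  cases xs with
  | nil => rfl
  | cons a xs =>
    rw [show (List.map f (a :: xs)).tail = List.map f xs from rfl, show (a :: xs).tail = xs from rfl,
      List.zip_map]
    simp [Prod.map]

theorem pairs_nonneg (l : List Bool) : ∀ p ∈ (fIdx l).zip (fIdx l).tail, 0 ≤ p.1 := by
  intro p hp
  exact fIdx_nonneg l p.1 (List.of_mem_zip hp).1

theorem S1cons (ms : Int) (l : List Bool) :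
    set_false_between (true :: l) ms = true :: set_false_between l ms := by
  rw [A_eq_pairsFold, A_eq_pairsFold]
  have hfi : fIdx (true :: l) = (fIdx l).map (· + 1) := by simp [fIdx]
  rw [hfi, zip_tail_map]
  have := pairsShiftK ms ((fIdx l).zip (fIdx l).tail) [true] l (pairs_nonneg l)
  simpa using this

theorem S1 (ms : Int) (t l : List Bool) (h : ∀ x ∈ t, x = true) :
    set_false_between (t ++ l) ms = t ++ set_false_between l ms := by
  induction t with
  | nil => simp
  | cons x t ih =>
    have hx := h x (by simp)
    subst hx
    rw [List.cons_append, S1cons, ih (fun y hy => h y (by simp [hy]))]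
    simp

theorem A_false_allTrue (ms : Int) (l : List Bool) (h : ∀ x ∈ l, x = true) :
    set_false_between (false :: l) ms = false :: l := by
  rw [A_eq_pairsFold]
  have hfi : fIdx (false :: l) = [0] := by simp [fIdx, fIdx_allTrue l h]
  rw [hfi]
  rfl

theorem pairsFold_cons_zero (ms : Int) (ys : List Int) (c : Int) (Y : List Int)
    (hys : ys = c :: Y) (arr : List Bool) :
    pairsFold ms (((0 : Int) :: ys).zip ((0 : Int) :: ys).tail) arr
      = pairsFold ms (ys.zip ys.tail) (fill ms arr 0 c) := by
  subst hys
  simp [pairsFold]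

theorem S3 (ms : Int) (t rest : List Bool) (h : ∀ x ∈ t, x = true) :
    set_false_between (false :: (t ++ false :: rest)) ms
      = false :: (fillRun ms t ++ set_false_between (false :: rest) ms) := by
  rw [A_eq_pairsFold, A_eq_pairsFold]
  have ht : t = List.replicate t.length true := List.eq_replicate_of_mem h
  have h1 : fIdx (t ++ false :: rest) = (fIdx (false :: rest)).map (· + (t.length : Int)) := by
    conv_lhs => rw [ht]
    rw [fIdx_replicate_true_append]
  have hfull : fIdx (false :: (t ++ false :: rest))
      = 0 :: (fIdx (false :: rest)).map (· + ((t.length : Int) + 1)) := by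
    simp [fIdx, h1, map_add_add]
    intros
    ring
  have hfi0 : fIdx (false :: rest) = 0 :: (fIdx rest).map (· + 1) := by simp [fIdx]
  rw [hfull,
    pairsFold_cons_zero ms _ ((0 : Int) + ((t.length : Int) + 1))
      (((fIdx rest).map (· + 1)).map (· + ((t.length : Int) + 1)))
      (by rw [hfi0]; simp) _,
    show (0 : Int) + ((t.length : Int) + 1) = (t.length : Int) + 1 by ring]
  have hfill : fill ms (false :: (t ++ false :: rest)) 0 ((t.length : Int) + 1)
      = (false :: fillRun ms t) ++ (false :: rest) := by
    rw [fillFirst]; rfl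
  rw [hfill, zip_tail_map (· + ((t.length : Int) + 1)) (fIdx (false :: rest))]
  have hk : ((t.length : Int) + 1) = (((false :: fillRun ms t).length : Int)) := by
    simp [length_fillRun]
  rw [hk]
  have hnn : ∀ p ∈ (fIdx (false :: rest)).zip (fIdx (false :: rest)).tail, 0 ≤ p.1 :=
    pairs_nonneg (false :: rest)
  rw [pairsShiftK ms _ (false :: fillRun ms t) (false :: rest) hnn]
  simp

theorem hAux_false_shift (ms : Int) (l p2 pend : List Bool) :
    hAux ms false (p2 ++ pend) l = p2 ++ hAux ms false pend l := by
  induction l generalizing pend with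
  | nil => simp [hAux]
  | cons b l ih =>
    cases b with
    | false => simp [hAux]
    | true => rw [hAux, hAux, List.append_assoc, ih]

theorem hAux_allTrue (ms : Int) (seen : Bool) (pend t : List Bool) (h : ∀ x ∈ t, x = true) :
    hAux ms seen pend t = pend ++ t := by
  induction t generalizing pend with
  | nil => simp [hAux]
  | cons b t ih =>
    have hb := h b (by simp)
    subst hb
    rw [hAux, ih _ (fun x hx => h x (by simp [hx]))]
    simp

theorem hAux_true_run (ms : Int) (t rest pend : List Bool) (h : ∀ x ∈ t, x = true) :
    hAux ms true pend (t ++ false :: rest)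
      = fillRun ms (pend ++ t) ++ false :: hAux ms true [] rest := by
  induction t generalizing pend with
  | nil => simp [hAux]
  | cons b t ih =>
    have hb := h b (by simp)
    subst hb
    rw [List.cons_append, hAux, ih _ (fun x hx => h x (by simp [hx]))]
    simp

theorem hAux_trues_prefix (ms : Int) (t l : List Bool) (h : ∀ x ∈ t, x = true) :
    hAux ms false [] (t ++ l) = t ++ hAux ms false [] l := by
  induction t with
  | nil => simp
  | cons b t ih =>
    have hb := h b (by simp)
    subst hb
    rw [List.cons_append, hAux, show ([] : List Bool) ++ [true] = [true] ++ [] from by simp,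
      hAux_false_shift, ih (fun x hx => h x (by simp [hx]))]
    simp

theorem dropWhile_cons_false (p : Bool → Bool) :
    ∀ (l : List Bool) (b : Bool) (r' : List Bool), l.dropWhile p = b :: r' → p b = false := by
  intro l
  induction l with
  | nil => intro b r' hcontr; simp [List.dropWhile] at hcontr
  | cons x xs ih =>
    intro b r' hx
    by_cases hpx : p x = true
    · rw [List.dropWhile_cons_of_pos hpx] at hx
      exact ih b r' hx
    · rw [List.dropWhile_cons_of_neg hpx] at hx
      obtain ⟨hxb, -⟩ := List.cons.inj hx
      rw [← hxb]
      simpa using hpx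

theorem main_aux (ms : Int) (l : List Bool) :
    set_false_between (false :: l) ms = false :: hAux ms true [] l := by
  generalize hn : l.length = n
  induction n using Nat.strong_induction_on generalizing l with
  | _ n ih =>
    have hsplit : l.takeWhile (fun x : Bool => x) ++ l.dropWhile (fun x : Bool => x) = l :=
      List.takeWhile_append_dropWhile
    have htT : ∀ x ∈ l.takeWhile (fun x : Bool => x), x = true := by
      intro x hx
      simpa using List.mem_takeWhile_imp hx
    cases hr : l.dropWhile (fun x : Bool => x) with
    | nil =>
      have hall : ∀ x ∈ l, x = true := by
        intro x hx
        rw [← hsplit] at hx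
        rw [hr] at hx
        simp at hx
        exact htT x hx
      rw [A_false_allTrue ms l hall, hAux_allTrue ms true [] l hall]
      simp
    | cons b r' =>
      have hb : b = false := by
        simpa using dropWhile_cons_false (fun x : Bool => x) l b r' hr
      subst hb
      have hl : l = l.takeWhile (fun x : Bool => x) ++ false :: r' := by
        conv_lhs => rw [← hsplit]
        rw [hr]
      have hlen : r'.length < n := by
        rw [← hn, hl]
        simp
        omega
      rw [hl, S3 ms _ r' htT, ih r'.length hlen r' rfl,
        hAux_true_run ms _ r' [] htT]
      simp

theorem main_eq (ms : Int) (l : List Bool) :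
    set_false_between l ms = hAux ms false [] l := by
  have hsplit : l.takeWhile (fun x : Bool => x) ++ l.dropWhile (fun x : Bool => x) = l :=
    List.takeWhile_append_dropWhile
  have htT : ∀ x ∈ l.takeWhile (fun x : Bool => x), x = true := by
    intro x hx
    simpa using List.mem_takeWhile_imp hx
  cases hr : l.dropWhile (fun x : Bool => x) with
  | nil =>
    have hall : ∀ x ∈ l, x = true := by
      intro x hx
      rw [← hsplit] at hx
      rw [hr] at hx
      simp at hx
      exact htT x hx
    rw [A_eq_pairsFold, fIdx_allTrue l hall, hAux_allTrue ms false [] l hall]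
    rfl
  | cons b r' =>
    have hb : b = false := by
      simpa using dropWhile_cons_false (fun x : Bool => x) l b r' hr
    subst hb
    have hl : l = l.takeWhile (fun x : Bool => x) ++ false :: r' := by
      conv_lhs => rw [← hsplit]
      rw [hr]
    rw [hl, S1 ms _ _ htT, main_aux, hAux_trues_prefix ms _ _ htT]
    rfl

theorem B_eq_hAux (l : List Bool) (ms : Int) :
    set_false_between_alt l ms = hAux ms false [] l := by
  suffices h : ∀ (l res pend : List Bool) (seen : Bool),
      (let s := l.foldl (fun (st : List Bool × Bool × List Bool) val =>
        if val = false then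
          (st.1 ++ (if st.2.1 && decide ((st.2.2.length : Int) ≤ ms)
                    then List.replicate st.2.2.length false else st.2.2) ++ [false],
           true, ([] : List Bool))
        else (st.1, st.2.1, st.2.2 ++ [val])) (res, seen, pend)
       s.1 ++ s.2.2) = res ++ hAux ms seen pend l by
    simpa [set_false_between_alt] using h l [] [] false
  intro l
  induction l with
  | nil => intro res pend seen; simp [hAux]
  | cons b l ih =>
    intro res pend seen
    cases b with
    | false =>
      simp only [List.foldl_cons, if_pos rfl, ih, hAux]
      cases seen <;> simp [fillRun, List.append_assoc]
    | true =>
      simp only [List.foldl_cons, reduceCtorEq, Bool.true_eq_false, ite_false, ih, hAux]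

-- ===== VERDICT (by name: the statement is the Claim_ definition above) =====
theorem set_false_between_spec : Claim_equal_set_false_between := by
  intro array min_size _
  unfold Spec_set_false_between
  rw [main_eq, B_eq_hAux]
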